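-- pv_equiv track=rewrite | github.com/alexandershov/epi | epi/chapter_05.py | make_lookup_table
-- ===== SOURCE A (Python) =====
-- def make_lookup_table(size):
--     result = []
--     for i in range(size):
--         x = i
--         num_bits = 0
--         while x:
--             num_bits += (x & 1)
--             x = x >> 1
--         result.append(num_bits)
--     return result
-- ===== SOURCE B (Python) =====
-- def make_lookup_table(size):
--     if size <= 0:
--         return []
--     table = [0]
--     for i in range(1, size):
--         table.append(table[i // 2] + i % 2)
--     return table
-- ===== Notes on version B (the rewrite author's own statement) =====
-- stated objective: faster
-- what changed: replaces the per-element bit-counting while-loop with a dynamic program that reads the already-computed count at i//2 and adds the low bit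
import Mathlib
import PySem

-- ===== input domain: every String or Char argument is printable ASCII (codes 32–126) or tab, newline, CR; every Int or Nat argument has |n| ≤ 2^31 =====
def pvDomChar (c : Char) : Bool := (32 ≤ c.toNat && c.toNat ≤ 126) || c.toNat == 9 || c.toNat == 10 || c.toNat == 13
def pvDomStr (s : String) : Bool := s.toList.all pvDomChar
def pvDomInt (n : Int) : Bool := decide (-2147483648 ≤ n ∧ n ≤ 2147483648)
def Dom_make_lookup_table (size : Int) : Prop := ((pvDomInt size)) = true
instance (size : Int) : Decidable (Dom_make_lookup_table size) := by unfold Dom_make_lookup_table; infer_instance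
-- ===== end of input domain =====

-- B replaces A's per-element bit-counting inner loop by a DP reading the count at i//2 (faster).

-- ===== PORT A =====
-- the 'while x:' loop; 'x & 1' = mod x 2 and 'x >> 1' = floordiv x 2 exactly; the guard is
-- '0 < x' rather than 'x ≠ 0' and the fuel x.toNat (enough since x halves each step) are
-- only for totality (Python diverges on negative x, which never occurs)
def pvNumBits (fuel : Nat) (x : Int) (num_bits : Int) : Int :=
  match fuel with
  | 0 => num_bits
  | f + 1 =>
    if 0 < x then pvNumBits f (PySem.Int.floordiv x 2) (num_bits + PySem.Int.mod x 2)
    else num_bits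

def make_lookup_table (size : Int) : List Int :=
  (PySem.List.pyRange 0 size 1).foldl (fun result i => result ++ [pvNumBits i.toNat i 0]) []

-- ===== PORT B =====
-- table[i // 2] is always in range (i//2 < i ≤ len), so pyGetD's default is never used
def make_lookup_table_alt (size : Int) : List Int :=
  if size ≤ 0 then []
  else (PySem.List.pyRange 1 size 1).foldl
    (fun table i =>
      table ++ [PySem.List.pyGetD table (PySem.Int.floordiv i 2) 0 + PySem.Int.mod i 2]) [0]

-- ===== PRECONDITION & SPEC =====
def Spec_make_lookup_table (size : Int) (out : List Int) : Prop := out = make_lookup_table_alt size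
instance (size : Int) (out : List Int) : Decidable (Spec_make_lookup_table size out) := by unfold Spec_make_lookup_table; infer_instance

-- ===== CLAIM (what is proved, stated in full; the proofs are below) =====
def Claim_equal_make_lookup_table : Prop := ∀ (size : Int), Dom_make_lookup_table size → Spec_make_lookup_table size (make_lookup_table size)

-- ===== LEMMAS AND PROOFS =====

-- the mathematical bit count both programs compute
def bcN (n : Nat) : Int :=
  if n = 0 then 0 else bcN (n / 2) + (n % 2 : Nat)
decreasing_by omega

theorem bcN_succ (m : Nat) : bcN (m + 1) = bcN ((m + 1) / 2) + ((m + 1) % 2 : Nat) := by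
  rw [bcN]; simp

theorem pvNumBits_eq (n : Nat) :
    ∀ fuel : Nat, n ≤ fuel → ∀ acc : Int, pvNumBits fuel (n : Int) acc = acc + bcN n := by
  induction n using Nat.strong_induction_on with
  | _ n ih =>
    intro fuel hfuel acc
    by_cases h : n = 0
    · subst h
      cases fuel <;> simp [pvNumBits, bcN]
    · obtain ⟨f, rfl⟩ : ∃ f, fuel = f + 1 := ⟨fuel - 1, by omega⟩
      rw [pvNumBits, bcN]
      have h0 : (0 : Int) < (n : Int) := by omega
      rw [if_pos h0, if_neg h]
      have hf : PySem.Int.floordiv (n : Int) 2 = ((n / 2 : Nat) : Int) := by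
        exact_mod_cast PySem.Int.floordiv_natCast n 2
      have hg : PySem.Int.mod (n : Int) 2 = ((n % 2 : Nat) : Int) := by
        exact_mod_cast PySem.Int.mod_natCast n 2
      rw [hf, hg, ih (n / 2) (by omega) f (by omega)]
      ring

theorem foldl_app_map (f : Int → Int) (l : List Int) :
    ∀ init : List Int, l.foldl (fun r i => r ++ [f i]) init = init ++ l.map f := by
  induction l with
  | nil => simp
  | cons x xs ih => intro init; simp [List.foldl_cons, ih]

theorem make_lookup_table_eq (size : Int) :
    make_lookup_table size = (List.range size.toNat).map bcN := by
  unfold make_lookup_table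
  rw [foldl_app_map (fun i => pvNumBits i.toNat i 0)]
  rw [PySem.List.pyRange_one]
  simp only [List.map_map]
  have : (size - 0).toNat = size.toNat := by omega
  rw [this]
  apply List.map_congr_left
  intro k hk
  simp only [Function.comp_apply, zero_add]
  rw [(by simp : ((k : Int)).toNat = k), pvNumBits_eq k k le_rfl 0, zero_add]

-- the DP loop invariant: after processing 1..m, the table is the bit counts of 0..m
theorem alt_loop (m : Nat) :
    (PySem.List.pyRange 1 ((m : Int) + 1) 1).foldl
      (fun table i =>
        table ++ [PySem.List.pyGetD table (PySem.Int.floordiv i 2) 0 + PySem.Int.mod i 2]) [0]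
    = (List.range (m + 1)).map bcN := by
  induction m with
  | zero =>
    rw [PySem.List.pyRange_one]
    norm_num
    rw [bcN]; simp
  | succ m ih =>
    have hsplit : PySem.List.pyRange 1 ((m : Int) + 1 + 1) 1
        = PySem.List.pyRange 1 ((m : Int) + 1) 1 ++ [(m : Int) + 1] := by
      rw [PySem.List.pyRange_one, PySem.List.pyRange_one]
      have h1 : ((m : Int) + 1 + 1 - 1).toNat = m + 1 := by omega
      have h2 : ((m : Int) + 1 - 1).toNat = m := by omega
      rw [h1, h2, List.range_succ, List.map_append]
      simp
      omega
    push_cast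
    rw [hsplit, List.foldl_append, ih]
    simp only [List.foldl_cons, List.foldl_nil]
    have hf : PySem.Int.floordiv ((m : Int) + 1) 2 = (((m + 1) / 2 : Nat) : Int) := by
      exact_mod_cast PySem.Int.floordiv_natCast (m + 1) 2
    have hg : PySem.Int.mod ((m : Int) + 1) 2 = (((m + 1) % 2 : Nat) : Int) := by
      exact_mod_cast PySem.Int.mod_natCast (m + 1) 2
    rw [hf, hg, PySem.List.pyGetD_natCast]
    have hlt : (m + 1) / 2 < (List.range (m + 1)).length := by simp; omega
    have hget : ((List.range (m + 1)).map bcN).getD ((m + 1) / 2) 0 = bcN ((m + 1) / 2) := by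
      rw [List.getD_eq_getElem?_getD]
      rw [List.getElem?_map]
      simp [List.getElem?_range (by omega : (m + 1) / 2 < m + 1)]
    rw [hget, ← bcN_succ]
    simp [List.range_succ]

-- ===== VERDICT (by name: the statement is the Claim_ definition above) =====
theorem make_lookup_table_spec : Claim_equal_make_lookup_table := by
  intro size _
  unfold Spec_make_lookup_table make_lookup_table_alt
  by_cases h : size ≤ 0
  · rw [if_pos h, make_lookup_table_eq]
    have : size.toNat = 0 := by omega
    simp [this]
  · rw [if_neg h, make_lookup_table_eq]
    obtain ⟨m, hm⟩ : ∃ m, size.toNat = m + 1 := ⟨size.toNat - 1, by omega⟩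
    have hs : size = (m : Int) + 1 := by omega
    rw [hs, alt_loop m]
    have : ((m : Int) + 1).toNat = m + 1 := by omega
    rw [this]
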